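-- pv_equiv track=rewrite | github.com/Drakosfire/RulesIngestion | experiments/rule_fact_benchmark_eval.py | _apply_phase2_applicability
-- ===== SOURCE A (Python) =====
-- from collections import Counter, defaultdict, deque
-- from typing import Dict, Iterable, List, Optional, Set, Tuple
--
-- def _apply_phase2_applicability(
--     reachable_nodes: Set[str],
--     fact_nodes: Dict[str, Dict[str, object]],
--     edges: List[Dict[str, object]],
-- ) -> Tuple[Set[str], Set[str], Set[str], Set[str]]:
--     reachable_facts = {node for node in reachable_nodes if node in fact_nodes}
--     gate_relations = {
--         "requires_condition",
--         "requires_state",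
--         "requires_trait",
--         "requires_level",
--         "requires_context",
--     }
--
--     gate_targets_by_fact: Dict[str, Set[str]] = defaultdict(set)
--     for edge in edges:
--         relation = edge.get("relation")
--         if relation not in gate_relations:
--             continue
--         source = edge.get("source")
--         target = edge.get("target")
--         if source in reachable_facts and target:
--             gate_targets_by_fact[str(source)].add(str(target))
--
--     active_facts: Set[str] = set()
--     for fact_id in reachable_facts:
--         gate_targets = gate_targets_by_fact.get(fact_id)
--         if not gate_targets:
--             active_facts.add(fact_id)
--             continue
--         if all(target in reachable_nodes for target in gate_targets):
--             active_facts.add(fact_id)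
--
--     target_procedures: Set[str] = set()
--     target_steps: Set[str] = set()
--     disabled_procedures: Set[str] = set()
--     disabled_steps: Set[str] = set()
--     for edge in edges:
--         relation = edge.get("relation")
--         source = edge.get("source")
--         target = edge.get("target")
--         if source not in active_facts or not target:
--             continue
--         target_id = str(target)
--         if relation in {"targets_procedure", "replaces_effect", "suppresses"}:
--             if target_id.startswith("procedure:") and "#step:" not in target_id:
--                 target_procedures.add(target_id)
--         if relation in {"targets_step", "replaces_effect", "suppresses"}:
--             if "#step:" in target_id:
--                 target_steps.add(target_id)
--         if relation in {"replaces_effect", "suppresses"}: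
--             if "#step:" in target_id:
--                 disabled_steps.add(target_id)
--             elif target_id.startswith("procedure:"):
--                 disabled_procedures.add(target_id)
--
--     enabled_procedures = target_procedures - disabled_procedures
--     enabled_steps = target_steps - disabled_steps
--
--     explanation_facts: Set[str] = set()
--     for edge in edges:
--         relation = edge.get("relation")
--         source = edge.get("source")
--         target = edge.get("target")
--         if source not in active_facts or not target:
--             continue
--         target_id = str(target)
--         if relation == "targets_procedure" and target_id in enabled_procedures:
--             explanation_facts.add(str(source))
--         elif relation == "targets_step" and target_id in enabled_steps:
--             explanation_facts.add(str(source))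
--         elif relation in {"replaces_effect", "suppresses"}:
--             explanation_facts.add(str(source))
--
--     return explanation_facts, active_facts, enabled_procedures, enabled_steps
-- ===== SOURCE B (Python) =====
-- def _apply_phase2_applicability(reachable_nodes, fact_nodes, edges):
--     gate_relations = {
--         "requires_condition",
--         "requires_state",
--         "requires_trait",
--         "requires_level",
--         "requires_context",
--     }
--     reachable_facts = {node for node in reachable_nodes if node in fact_nodes}
--
--     # One normalisation pass: coerced (source, target) pairs of gating edges out of reachable facts.
--     gate_pairs = [
--         (str(e.get("source")), str(e.get("target")))
--         for e in edges
--         if e.get("relation") in gate_relations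
--         and e.get("source") in reachable_facts
--         and e.get("target")
--     ]
--     active_facts = {
--         fact for fact in reachable_facts
--         if all(t in reachable_nodes for s, t in gate_pairs if s == fact)
--     }
--
--     # One normalisation pass: coerced (relation, source, target) records of edges out of active facts.
--     recs = [
--         (e.get("relation"), str(e.get("source")), str(e.get("target")))
--         for e in edges
--         if e.get("source") in active_facts and e.get("target")
--     ]
--     target_procedures = {
--         t for r, s, t in recs
--         if r in {"targets_procedure", "replaces_effect", "suppresses"}
--         and t.startswith("procedure:") and "#step:" not in t
--     }
--     target_steps = {
--         t for r, s, t in recs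
--         if r in {"targets_step", "replaces_effect", "suppresses"} and "#step:" in t
--     }
--     disabled_steps = {
--         t for r, s, t in recs if r in {"replaces_effect", "suppresses"} and "#step:" in t
--     }
--     disabled_procedures = {
--         t for r, s, t in recs
--         if r in {"replaces_effect", "suppresses"}
--         and "#step:" not in t and t.startswith("procedure:")
--     }
--     enabled_procedures = target_procedures - disabled_procedures
--     enabled_steps = target_steps - disabled_steps
--
--     explanation_facts = {
--         s for r, s, t in recs
--         if (r == "targets_procedure" and t in enabled_procedures)
--         or (r == "targets_step" and t in enabled_steps)
--         or r in {"replaces_effect", "suppresses"}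
--     }
--     return explanation_facts, active_facts, enabled_procedures, enabled_steps
-- ===== Notes on version B (the rewrite author's own statement) =====
-- stated objective: simpler
-- what changed: B drops the defaultdict of gate-target sets and A's three guarded full-edge scans: it normalises edges once into coerced (source, target) gate pairs and (relation, source, target) active-edge records, decides each fact's gating with an all() over its pairs, and derives all six sets as plain comprehensions over the records.
import Mathlib
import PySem

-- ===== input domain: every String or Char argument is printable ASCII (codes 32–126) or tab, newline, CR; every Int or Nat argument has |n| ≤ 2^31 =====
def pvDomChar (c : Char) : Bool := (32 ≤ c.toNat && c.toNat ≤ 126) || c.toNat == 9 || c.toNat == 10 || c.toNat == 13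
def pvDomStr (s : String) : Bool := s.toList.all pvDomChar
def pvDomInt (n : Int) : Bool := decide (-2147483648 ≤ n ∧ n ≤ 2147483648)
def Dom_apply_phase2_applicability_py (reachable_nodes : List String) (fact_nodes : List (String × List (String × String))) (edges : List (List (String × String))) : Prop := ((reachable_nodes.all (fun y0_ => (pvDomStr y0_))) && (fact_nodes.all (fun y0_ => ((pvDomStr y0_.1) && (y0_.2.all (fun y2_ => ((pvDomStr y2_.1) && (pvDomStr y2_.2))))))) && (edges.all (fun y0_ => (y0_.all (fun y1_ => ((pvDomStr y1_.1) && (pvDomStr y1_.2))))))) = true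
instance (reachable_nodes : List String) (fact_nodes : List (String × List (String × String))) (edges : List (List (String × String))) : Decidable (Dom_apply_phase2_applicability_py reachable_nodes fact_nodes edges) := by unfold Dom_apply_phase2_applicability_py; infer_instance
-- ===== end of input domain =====

-- B replaces A's defaultdict of gate-target sets and its three guarded full-edge scans by two
-- normalisation passes (coerced gate pairs / active-edge records) consumed by set comprehensions
-- (objective: simpler decomposition, same asymptotic cost). Return-value equivalence only.

-- shared vocabulary: the relation-name constants and Python's 'x in {…}' on an optional value
def pvGateRels : List String :=
  ["requires_condition", "requires_state", "requires_trait", "requires_level", "requires_context"]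
def pvTPRels : List String := ["targets_procedure", "replaces_effect", "suppresses"]
def pvTSRels : List String := ["targets_step", "replaces_effect", "suppresses"]
def pvEffRels : List String := ["replaces_effect", "suppresses"]
def pvOptMem (r : Option String) (l : List String) : Bool :=
  match r with
  | some x => l.contains x
  | none => false

-- ===== PORT A =====
-- first edge loop: gate_targets_by_fact[str(source)].add(str(target)) (defaultdict(set))
def pvA_gateStep (reachable_facts : List String) (d : PySem.Dict String (PySem.Set String))
    (e : List (String × String)) : PySem.Dict String (PySem.Set String) :=
  if pvOptMem ((PySem.Dict.mk e).get? "relation") pvGateRels then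
    match (PySem.Dict.mk e).get? "source", (PySem.Dict.mk e).get? "target" with
    | some s, some t =>
      if s ∈ reachable_facts ∧ t ≠ "" then
        PySem.Dict.modify d s PySem.Set.empty (fun S => PySem.Set.add S t)
      else d
    | some _, none => d
    | none, _ => d
  else d

-- second edge loop: the four target/disabled sets
def pvA_classStep (active : List String)
    (acc : PySem.Set String × PySem.Set String × PySem.Set String × PySem.Set String)
    (e : List (String × String)) :
    PySem.Set String × PySem.Set String × PySem.Set String × PySem.Set String :=
  let rel := (PySem.Dict.mk e).get? "relation"
  match (PySem.Dict.mk e).get? "source", (PySem.Dict.mk e).get? "target" with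
  | some s, some t =>
    if s ∈ active ∧ t ≠ "" then
      (if pvOptMem rel pvTPRels then
        (if PySem.Str.startswith t "procedure:" && !(PySem.Str.isIn "#step:" t) then PySem.Set.add acc.1 t else acc.1)
       else acc.1,
       if pvOptMem rel pvTSRels then
        (if PySem.Str.isIn "#step:" t then PySem.Set.add acc.2.1 t else acc.2.1)
       else acc.2.1,
       if pvOptMem rel pvEffRels then
        (if PySem.Str.isIn "#step:" t then acc.2.2.1
         else if PySem.Str.startswith t "procedure:" then PySem.Set.add acc.2.2.1 t else acc.2.2.1)
       else acc.2.2.1,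
       if pvOptMem rel pvEffRels then
        (if PySem.Str.isIn "#step:" t then PySem.Set.add acc.2.2.2 t else acc.2.2.2)
       else acc.2.2.2)
    else acc
  | some _, none => acc
  | none, _ => acc

-- third edge loop: explanation_facts
def pvA_explStep (active ep es : List String) (acc : PySem.Set String)
    (e : List (String × String)) : PySem.Set String :=
  let rel := (PySem.Dict.mk e).get? "relation"
  match (PySem.Dict.mk e).get? "source", (PySem.Dict.mk e).get? "target" with
  | some s, some t =>
    if s ∈ active ∧ t ≠ "" then
      if rel == some "targets_procedure" && ep.contains t then PySem.Set.add acc s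
      else if rel == some "targets_step" && es.contains t then PySem.Set.add acc s
      else if pvOptMem rel pvEffRels then PySem.Set.add acc s
      else acc
    else acc
  | some _, none => acc
  | none, _ => acc

def apply_phase2_applicability_py (reachable_nodes : List String) (fact_nodes : List (String × List (String × String))) (edges : List (List (String × String))) : List String × List String × List String × List String :=
  let reachable_facts : PySem.Set String :=
    PySem.Set.ofList (reachable_nodes.filter (fun node => (PySem.Dict.mk fact_nodes).contains node))
  let gd : PySem.Dict String (PySem.Set String) :=
    edges.foldl (pvA_gateStep reachable_facts) PySem.Dict.empty
  let active_facts : PySem.Set String :=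
    reachable_facts.foldl (fun acc f =>
      match PySem.Dict.get? gd f with
      | none => PySem.Set.add acc f
      | some gts =>
        if gts.isEmpty then PySem.Set.add acc f
        else if gts.all (fun t => reachable_nodes.contains t) then PySem.Set.add acc f
        else acc) PySem.Set.empty
  let r2 := edges.foldl (pvA_classStep active_facts)
    (PySem.Set.empty, PySem.Set.empty, PySem.Set.empty, PySem.Set.empty)
  let enabled_procedures := PySem.Set.diff r2.1 r2.2.2.1
  let enabled_steps := PySem.Set.diff r2.2.1 r2.2.2.2
  let explanation_facts :=
    edges.foldl (pvA_explStep active_facts enabled_procedures enabled_steps) PySem.Set.empty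
  (explanation_facts, active_facts, enabled_procedures, enabled_steps)

-- ===== PORT B =====
-- gate_pairs comprehension: (source, target) of gating edges out of reachable facts
def pvB_gatePair (reachable_facts : List String) (e : List (String × String)) :
    Option (String × String) :=
  match (PySem.Dict.mk e).get? "source", (PySem.Dict.mk e).get? "target" with
  | some s, some t =>
    if pvOptMem ((PySem.Dict.mk e).get? "relation") pvGateRels ∧ s ∈ reachable_facts ∧ t ≠ "" then
      some (s, t)
    else none
  | some _, none => none
  | none, _ => none

-- recs comprehension: (relation, source, target) of edges out of active facts
def pvB_rec (active : List String) (e : List (String × String)) :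
    Option (Option String × String × String) :=
  match (PySem.Dict.mk e).get? "source", (PySem.Dict.mk e).get? "target" with
  | some s, some t =>
    if s ∈ active ∧ t ≠ "" then some ((PySem.Dict.mk e).get? "relation", s, t) else none
  | some _, none => none
  | none, _ => none

def apply_phase2_applicability_py_alt (reachable_nodes : List String) (fact_nodes : List (String × List (String × String))) (edges : List (List (String × String))) : List String × List String × List String × List String :=
  let reachable_facts : PySem.Set String :=
    PySem.Set.ofList (reachable_nodes.filter (fun node => (PySem.Dict.mk fact_nodes).contains node))
  let gate_pairs : List (String × String) := edges.filterMap (pvB_gatePair reachable_facts)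
  let active_facts : PySem.Set String := PySem.Set.ofList (reachable_facts.filter (fun f =>
    (gate_pairs.filter (fun p => p.1 == f)).all (fun p => reachable_nodes.contains p.2)))
  let recs : List (Option String × String × String) := edges.filterMap (pvB_rec active_facts)
  let target_procedures : PySem.Set String := PySem.Set.ofList ((recs.filter (fun r =>
    pvOptMem r.1 pvTPRels && (PySem.Str.startswith r.2.2 "procedure:" && !(PySem.Str.isIn "#step:" r.2.2)))).map (fun r => r.2.2))
  let target_steps : PySem.Set String := PySem.Set.ofList ((recs.filter (fun r =>
    pvOptMem r.1 pvTSRels && PySem.Str.isIn "#step:" r.2.2)).map (fun r => r.2.2))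
  let disabled_steps : PySem.Set String := PySem.Set.ofList ((recs.filter (fun r =>
    pvOptMem r.1 pvEffRels && PySem.Str.isIn "#step:" r.2.2)).map (fun r => r.2.2))
  let disabled_procedures : PySem.Set String := PySem.Set.ofList ((recs.filter (fun r =>
    pvOptMem r.1 pvEffRels && (!(PySem.Str.isIn "#step:" r.2.2) && PySem.Str.startswith r.2.2 "procedure:"))).map (fun r => r.2.2))
  let enabled_procedures := PySem.Set.diff target_procedures disabled_procedures
  let enabled_steps := PySem.Set.diff target_steps disabled_steps
  let explanation_facts : PySem.Set String := PySem.Set.ofList ((recs.filter (fun r =>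
    (r.1 == some "targets_procedure" && enabled_procedures.contains r.2.2) ||
    (r.1 == some "targets_step" && enabled_steps.contains r.2.2) ||
    pvOptMem r.1 pvEffRels)).map (fun r => r.2.1))
  (explanation_facts, active_facts, enabled_procedures, enabled_steps)

-- ===== PRECONDITION & SPEC =====
def Spec_apply_phase2_applicability_py (reachable_nodes : List String) (fact_nodes : List (String × List (String × String))) (edges : List (List (String × String))) (out : List String × List String × List String × List String) : Prop := out = apply_phase2_applicability_py_alt reachable_nodes fact_nodes edges
instance (reachable_nodes : List String) (fact_nodes : List (String × List (String × String))) (edges : List (List (String × String))) (out : List String × List String × List String × List String) : Decidable (Spec_apply_phase2_applicability_py reachable_nodes fact_nodes edges out) := by unfold Spec_apply_phase2_applicability_py; infer_instance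

-- ===== CLAIM (what is proved, stated in full; the proofs are below) =====
def Claim_equal_apply_phase2_applicability_py : Prop := ∀ (reachable_nodes : List String) (fact_nodes : List (String × List (String × String))) (edges : List (List (String × String))), Dom_apply_phase2_applicability_py reachable_nodes fact_nodes edges → Spec_apply_phase2_applicability_py reachable_nodes fact_nodes edges (apply_phase2_applicability_py reachable_nodes fact_nodes edges)

-- ===== LEMMAS AND PROOFS =====

-- a fold whose body acts only on the filterMap representative is a fold over the filterMap
theorem pv_foldl_eq_foldl_filterMap {α β γ : Type} (l : List α) (f : α → Option β)
    (g : γ → β → γ) (body : γ → α → γ)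
    (hsome : ∀ acc e r, f e = some r → body acc e = g acc r)
    (hnone : ∀ acc e, f e = none → body acc e = acc) :
    ∀ init : γ, l.foldl body init = (l.filterMap f).foldl g init := by
  induction l with
  | nil => intro init; rfl
  | cons a l ih =>
    intro init
    rw [List.foldl_cons, List.filterMap_cons]
    cases hf : f a with
    | none => rw [hnone init a hf]; exact ih init
    | some r => rw [hsome init a r hf, List.foldl_cons]; exact ih (g init r)

-- a conditional-add fold is Set.update with the filtered, mapped list
theorem pv_foldl_ite_add {α β : Type} [BEq β] (l : List α) (c : α → Bool) (g : α → β) :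
    ∀ s0 : PySem.Set β,
      l.foldl (fun s r => if c r then PySem.Set.add s (g r) else s) s0
        = PySem.Set.update s0 ((l.filter c).map g) := by
  induction l with
  | nil => intro s0; rfl
  | cons a l ih =>
    intro s0
    rw [List.foldl_cons, List.filter_cons]
    cases h : c a with
    | false => simp only [Bool.false_eq_true, if_false]; exact ih s0
    | true =>
      simp only [if_true, List.map_cons]
      rw [ih (PySem.Set.add s0 (g a))]
      rfl

theorem pv_set_all_ofList (l : List String) (p : String → Bool) :
    (PySem.Set.ofList l).all p = l.all p := by
  cases h : l.all p with
  | true =>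
    rw [List.all_eq_true] at h ⊢
    intro x hx
    exact h x ((PySem.Set.mem_ofList _ _).1 hx)
  | false =>
    rw [← Bool.not_eq_true, List.all_eq_true] at h ⊢
    intro hall
    exact h (fun x hx => hall x ((PySem.Set.mem_ofList _ _).2 hx))

-- the gate dict entry at f collects exactly the gate pairs with source f, in order
theorem pv_gate_getD (rf : List String) (edges : List (List (String × String))) (f : String) :
    ∀ d : PySem.Dict String (PySem.Set String),
      PySem.Dict.getD (edges.foldl (pvA_gateStep rf) d) f PySem.Set.empty
        = PySem.Set.update (PySem.Dict.getD d f PySem.Set.empty)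
            (((edges.filterMap (pvB_gatePair rf)).filter (fun p => p.1 == f)).map (fun p => p.2)) := by
  induction edges with
  | nil => intro d; rfl
  | cons e edges ih =>
    intro d
    rw [List.foldl_cons, List.filterMap_cons]
    have hstep : (pvA_gateStep rf d e, (pvB_gatePair rf e : Option (String × String)))
        = (match pvB_gatePair rf e with
           | some p => PySem.Dict.modify d p.1 PySem.Set.empty (fun S => PySem.Set.add S p.2)
           | none => d, pvB_gatePair rf e) := by
      unfold pvA_gateStep pvB_gatePair
      cases (PySem.Dict.mk e).get? "source" with
      | none => cases pvOptMem ((PySem.Dict.mk e).get? "relation") pvGateRels <;> simp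
      | some s =>
        cases (PySem.Dict.mk e).get? "target" with
        | none => cases pvOptMem ((PySem.Dict.mk e).get? "relation") pvGateRels <;> simp
        | some t =>
          cases h : pvOptMem ((PySem.Dict.mk e).get? "relation") pvGateRels with
          | false => simp
          | true =>
            by_cases hs : s ∈ rf ∧ t ≠ "" <;> simp [hs]
    have hA := congrArg Prod.fst hstep
    have hB := congrArg Prod.snd hstep
    simp only at hA hB
    rw [hA]
    cases hg : pvB_gatePair rf e with
    | none => exact ih d
    | some p =>
      simp only [hg, List.filter_cons]
      cases hpf : (p.1 == f) with
      | false =>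
        rw [ih (PySem.Dict.modify d p.1 PySem.Set.empty (fun S => PySem.Set.add S p.2))]
        rw [PySem.Dict.getD_modify]
        have : ¬ (f = p.1) := fun hh => by simp [hh] at hpf
        simp [this]
      | true =>
        have hfp : f = p.1 := (eq_of_beq hpf).symm
        rw [ih (PySem.Dict.modify d p.1 PySem.Set.empty (fun S => PySem.Set.add S p.2))]
        rw [PySem.Dict.getD_modify]
        simp only [hfp, if_pos rfl, List.map_cons]
        rfl


-- a conditional-add fold of the element itself
theorem pv_foldl_ite_add_id {β : Type} [BEq β] (l : List β) (c : β → Bool) :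
    ∀ s0 : PySem.Set β,
      l.foldl (fun s r => if c r then PySem.Set.add s r else s) s0
        = PySem.Set.update s0 (l.filter c) := by
  induction l with
  | nil => intro s0; rfl
  | cons a l ih =>
    intro s0
    rw [List.foldl_cons, List.filter_cons]
    cases h : c a with
    | false => simp only [Bool.false_eq_true, if_false]; exact ih s0
    | true =>
      simp only [if_true]
      rw [ih (PySem.Set.add s0 a)]
      rfl

-- A's per-fact gating decision equals B's all() over the indexed gate pairs
theorem pv_active_eq (rn rf : List String) (edges : List (List (String × String))) :
    rf.foldl (fun acc f =>
      match PySem.Dict.get? (edges.foldl (pvA_gateStep rf) PySem.Dict.empty) f with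
      | none => PySem.Set.add acc f
      | some gts =>
        if gts.isEmpty then PySem.Set.add acc f
        else if gts.all (fun t => rn.contains t) then PySem.Set.add acc f
        else acc) PySem.Set.empty
    = PySem.Set.ofList (rf.filter (fun f =>
        ((edges.filterMap (pvB_gatePair rf)).filter (fun p => p.1 == f)).all
          (fun p => rn.contains p.2))) := by
  have hbody : ∀ (acc : PySem.Set String) (f : String),
      (match PySem.Dict.get? (edges.foldl (pvA_gateStep rf) PySem.Dict.empty) f with
       | none => PySem.Set.add acc f
       | some gts =>
         if gts.isEmpty then PySem.Set.add acc f
         else if gts.all (fun t => rn.contains t) then PySem.Set.add acc f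
         else acc)
      = if ((edges.filterMap (pvB_gatePair rf)).filter (fun p => p.1 == f)).all
            (fun p => rn.contains p.2)
        then PySem.Set.add acc f else acc := by
    intro acc f
    have hD := pv_gate_getD rf edges f PySem.Dict.empty
    rw [PySem.Dict.getD_empty] at hD
    have hS : (PySem.Dict.get? (edges.foldl (pvA_gateStep rf) PySem.Dict.empty) f).getD PySem.Set.empty
        = PySem.Set.ofList (((edges.filterMap (pvB_gatePair rf)).filter (fun p => p.1 == f)).map (fun p => p.2)) := by
      rw [← PySem.Dict.getD_eq_get?_getD, hD]; rfl
    have hall : (((edges.filterMap (pvB_gatePair rf)).filter (fun p => p.1 == f)).map (fun p => p.2)).all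
          (fun t => rn.contains t)
        = ((edges.filterMap (pvB_gatePair rf)).filter (fun p => p.1 == f)).all (fun p => rn.contains p.2) := by
      rw [List.all_map]; rfl
    rw [← hall, ← pv_set_all_ofList, ← hS]
    cases hq : PySem.Dict.get? (edges.foldl (pvA_gateStep rf) PySem.Dict.empty) f with
    | none => simp [hq]
    | some gts =>
      simp only [hq, Option.getD_some]
      cases he : gts.isEmpty with
      | true =>
        have : gts = [] := List.isEmpty_iff.1 he
        simp [this]
      | false => simp [he]
  rw [show (fun (acc : PySem.Set String) (f : String) =>
        match PySem.Dict.get? (edges.foldl (pvA_gateStep rf) PySem.Dict.empty) f with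
        | none => PySem.Set.add acc f
        | some gts =>
          if gts.isEmpty then PySem.Set.add acc f
          else if gts.all (fun t => rn.contains t) then PySem.Set.add acc f
          else acc)
      = (fun (acc : PySem.Set String) (f : String) =>
          if ((edges.filterMap (pvB_gatePair rf)).filter (fun p => p.1 == f)).all
              (fun p => rn.contains p.2)
          then PySem.Set.add acc f else acc)
      from funext fun acc => funext fun f => hbody acc f]
  rw [pv_foldl_ite_add_id]
  rfl

-- A's second-loop body acts only through the record B extracts
theorem pv_classStep_eq (act : List String)
    (acc : PySem.Set String × PySem.Set String × PySem.Set String × PySem.Set String)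
    (e : List (String × String)) :
    pvA_classStep act acc e =
      match pvB_rec act e with
      | some r =>
        (if pvOptMem r.1 pvTPRels && (PySem.Str.startswith r.2.2 "procedure:" && !(PySem.Str.isIn "#step:" r.2.2)) then PySem.Set.add acc.1 r.2.2 else acc.1,
         if pvOptMem r.1 pvTSRels && PySem.Str.isIn "#step:" r.2.2 then PySem.Set.add acc.2.1 r.2.2 else acc.2.1,
         if pvOptMem r.1 pvEffRels && (!(PySem.Str.isIn "#step:" r.2.2) && PySem.Str.startswith r.2.2 "procedure:") then PySem.Set.add acc.2.2.1 r.2.2 else acc.2.2.1,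
         if pvOptMem r.1 pvEffRels && PySem.Str.isIn "#step:" r.2.2 then PySem.Set.add acc.2.2.2 r.2.2 else acc.2.2.2)
      | none => acc := by
  unfold pvA_classStep pvB_rec
  cases (PySem.Dict.mk e).get? "source" with
  | none => rfl
  | some s =>
    cases (PySem.Dict.mk e).get? "target" with
    | none => rfl
    | some t =>
      by_cases hg : s ∈ act ∧ t ≠ ""
      · simp only [if_pos hg]
        cases h1 : pvOptMem ((PySem.Dict.mk e).get? "relation") pvTPRels <;>
        cases h2 : pvOptMem ((PySem.Dict.mk e).get? "relation") pvTSRels <;>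
        cases h3 : pvOptMem ((PySem.Dict.mk e).get? "relation") pvEffRels <;>
        cases h4 : PySem.Str.isIn "#step:" t <;>
        cases h5 : PySem.Str.startswith t "procedure:" <;>
          simp [h1, h2, h3, h4, h5]
      · simp only [if_neg hg]

-- A's second loop computes B's four comprehension sets
theorem pv_class_eq (act : List String) (edges : List (List (String × String))) :
    edges.foldl (pvA_classStep act)
      (PySem.Set.empty, PySem.Set.empty, PySem.Set.empty, PySem.Set.empty)
    = (PySem.Set.ofList (((edges.filterMap (pvB_rec act)).filter (fun r =>
         pvOptMem r.1 pvTPRels && (PySem.Str.startswith r.2.2 "procedure:" && !(PySem.Str.isIn "#step:" r.2.2)))).map (fun r => r.2.2)),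
       PySem.Set.ofList (((edges.filterMap (pvB_rec act)).filter (fun r =>
         pvOptMem r.1 pvTSRels && PySem.Str.isIn "#step:" r.2.2)).map (fun r => r.2.2)),
       PySem.Set.ofList (((edges.filterMap (pvB_rec act)).filter (fun r =>
         pvOptMem r.1 pvEffRels && (!(PySem.Str.isIn "#step:" r.2.2) && PySem.Str.startswith r.2.2 "procedure:"))).map (fun r => r.2.2)),
       PySem.Set.ofList (((edges.filterMap (pvB_rec act)).filter (fun r =>
         pvOptMem r.1 pvEffRels && PySem.Str.isIn "#step:" r.2.2)).map (fun r => r.2.2))) := by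
  rw [pv_foldl_eq_foldl_filterMap edges (pvB_rec act)
      (fun (acc : PySem.Set String × PySem.Set String × PySem.Set String × PySem.Set String)
           (r : Option String × String × String) =>
        (if pvOptMem r.1 pvTPRels && (PySem.Str.startswith r.2.2 "procedure:" && !(PySem.Str.isIn "#step:" r.2.2)) then PySem.Set.add acc.1 r.2.2 else acc.1,
         if pvOptMem r.1 pvTSRels && PySem.Str.isIn "#step:" r.2.2 then PySem.Set.add acc.2.1 r.2.2 else acc.2.1,
         if pvOptMem r.1 pvEffRels && (!(PySem.Str.isIn "#step:" r.2.2) && PySem.Str.startswith r.2.2 "procedure:") then PySem.Set.add acc.2.2.1 r.2.2 else acc.2.2.1,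
         if pvOptMem r.1 pvEffRels && PySem.Str.isIn "#step:" r.2.2 then PySem.Set.add acc.2.2.2 r.2.2 else acc.2.2.2))
      (pvA_classStep act)
      (fun acc e r hr => by rw [pv_classStep_eq act acc e, hr])
      (fun acc e hr => by rw [pv_classStep_eq act acc e, hr])]
  rw [PySem.List.foldl_prod_mk
      (f := fun (s : PySem.Set String) (r : Option String × String × String) =>
        if pvOptMem r.1 pvTPRels && (PySem.Str.startswith r.2.2 "procedure:" && !(PySem.Str.isIn "#step:" r.2.2)) then PySem.Set.add s r.2.2 else s)
      (g := fun (s : PySem.Set String × PySem.Set String × PySem.Set String) (r : Option String × String × String) =>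
        (if pvOptMem r.1 pvTSRels && PySem.Str.isIn "#step:" r.2.2 then PySem.Set.add s.1 r.2.2 else s.1,
         if pvOptMem r.1 pvEffRels && (!(PySem.Str.isIn "#step:" r.2.2) && PySem.Str.startswith r.2.2 "procedure:") then PySem.Set.add s.2.1 r.2.2 else s.2.1,
         if pvOptMem r.1 pvEffRels && PySem.Str.isIn "#step:" r.2.2 then PySem.Set.add s.2.2 r.2.2 else s.2.2))]
  rw [PySem.List.foldl_prod_mk
      (f := fun (s : PySem.Set String) (r : Option String × String × String) =>
        if pvOptMem r.1 pvTSRels && PySem.Str.isIn "#step:" r.2.2 then PySem.Set.add s r.2.2 else s)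
      (g := fun (s : PySem.Set String × PySem.Set String) (r : Option String × String × String) =>
        (if pvOptMem r.1 pvEffRels && (!(PySem.Str.isIn "#step:" r.2.2) && PySem.Str.startswith r.2.2 "procedure:") then PySem.Set.add s.1 r.2.2 else s.1,
         if pvOptMem r.1 pvEffRels && PySem.Str.isIn "#step:" r.2.2 then PySem.Set.add s.2 r.2.2 else s.2))]
  rw [PySem.List.foldl_prod_mk
      (f := fun (s : PySem.Set String) (r : Option String × String × String) =>
        if pvOptMem r.1 pvEffRels && (!(PySem.Str.isIn "#step:" r.2.2) && PySem.Str.startswith r.2.2 "procedure:") then PySem.Set.add s r.2.2 else s)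
      (g := fun (s : PySem.Set String) (r : Option String × String × String) =>
        if pvOptMem r.1 pvEffRels && PySem.Str.isIn "#step:" r.2.2 then PySem.Set.add s r.2.2 else s)]
  rw [pv_foldl_ite_add, pv_foldl_ite_add, pv_foldl_ite_add, pv_foldl_ite_add]
  rfl

-- A's third-loop body acts only through the record B extracts
theorem pv_explStep_eq (act ep es : List String) (acc : PySem.Set String)
    (e : List (String × String)) :
    pvA_explStep act ep es acc e =
      match pvB_rec act e with
      | some r =>
        if (r.1 == some "targets_procedure" && ep.contains r.2.2) ||
           (r.1 == some "targets_step" && es.contains r.2.2) ||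
           pvOptMem r.1 pvEffRels
        then PySem.Set.add acc r.2.1 else acc
      | none => acc := by
  unfold pvA_explStep pvB_rec
  cases (PySem.Dict.mk e).get? "source" with
  | none => rfl
  | some s =>
    cases (PySem.Dict.mk e).get? "target" with
    | none => rfl
    | some t =>
      by_cases hg : s ∈ act ∧ t ≠ ""
      · simp only [if_pos hg]
        cases h1 : ((PySem.Dict.mk e).get? "relation" == some "targets_procedure") <;>
        cases h2 : ((PySem.Dict.mk e).get? "relation" == some "targets_step") <;>
        cases h3 : pvOptMem ((PySem.Dict.mk e).get? "relation") pvEffRels <;>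
        cases h4 : ep.contains t <;>
        cases h5 : es.contains t <;>
          simp [h1, h2, h3, h4, h5]
      · simp only [if_neg hg]

-- A's third loop computes B's explanation comprehension
theorem pv_expl_eq (act ep es : List String) (edges : List (List (String × String))) :
    edges.foldl (pvA_explStep act ep es) PySem.Set.empty
    = PySem.Set.ofList (((edges.filterMap (pvB_rec act)).filter (fun r =>
        (r.1 == some "targets_procedure" && ep.contains r.2.2) ||
        (r.1 == some "targets_step" && es.contains r.2.2) ||
        pvOptMem r.1 pvEffRels)).map (fun r => r.2.1)) := by
  rw [pv_foldl_eq_foldl_filterMap edges (pvB_rec act)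
      (fun (acc : PySem.Set String) (r : Option String × String × String) =>
        if (r.1 == some "targets_procedure" && ep.contains r.2.2) ||
           (r.1 == some "targets_step" && es.contains r.2.2) ||
           pvOptMem r.1 pvEffRels
        then PySem.Set.add acc r.2.1 else acc)
      (pvA_explStep act ep es)
      (fun acc e r hr => by rw [pv_explStep_eq act ep es acc e, hr])
      (fun acc e hr => by rw [pv_explStep_eq act ep es acc e, hr])]
  rw [pv_foldl_ite_add]
  rfl

-- ===== VERDICT (by name: the statement is the Claim_ definition above) =====
theorem apply_phase2_applicability_py_spec : Claim_equal_apply_phase2_applicability_py := by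
  intro rn fns edges _
  show apply_phase2_applicability_py rn fns edges = apply_phase2_applicability_py_alt rn fns edges
  unfold apply_phase2_applicability_py apply_phase2_applicability_py_alt
  dsimp only
  rw [pv_active_eq rn (PySem.Set.ofList (rn.filter (fun node => (PySem.Dict.mk fns).contains node))) edges]
  rw [pv_class_eq, pv_expl_eq]
  rfl
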